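-- pv_equiv track=rewrite | github.com/schnitzer-lab/CORNN-public | analysis/experiment5-kbit/training_kbit_task/RNN_lib.py | gen_1d_output
-- ===== SOURCE A (Python) =====
-- def gen_1d_output(inputs_1d):
--     state = 0
--     t = []
--     for i in inputs_1d:
--         if i != 0:
--             state = i
--         t.append(state)
--     return t
-- ===== SOURCE B (Python) =====
-- def gen_1d_output(inputs_1d):
--     # Segment-fill: locate the nonzero entries once, then build the output
--     # as a leading block of zeros followed by each nonzero value replicated
--     # up to the next nonzero position (no running state over elements).
--     n = len(inputs_1d)
--     nz = [(i, v) for i, v in enumerate(inputs_1d) if v != 0]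
--     out = [0] * (nz[0][0] if nz else n)
--     for k, (p, v) in enumerate(nz):
--         end = nz[k + 1][0] if k + 1 < len(nz) else n
--         out += [v] * (end - p)
--     return out
-- ===== Notes on version B (the rewrite author's own statement) =====
-- stated objective: alternative
-- what changed: Replaces the element-by-element running-state scan with a two-stage segment fill: first collect the positions of the nonzero entries, then build the output as a leading zero block plus each nonzero value replicated up to the next nonzero position.
import Mathlib
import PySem

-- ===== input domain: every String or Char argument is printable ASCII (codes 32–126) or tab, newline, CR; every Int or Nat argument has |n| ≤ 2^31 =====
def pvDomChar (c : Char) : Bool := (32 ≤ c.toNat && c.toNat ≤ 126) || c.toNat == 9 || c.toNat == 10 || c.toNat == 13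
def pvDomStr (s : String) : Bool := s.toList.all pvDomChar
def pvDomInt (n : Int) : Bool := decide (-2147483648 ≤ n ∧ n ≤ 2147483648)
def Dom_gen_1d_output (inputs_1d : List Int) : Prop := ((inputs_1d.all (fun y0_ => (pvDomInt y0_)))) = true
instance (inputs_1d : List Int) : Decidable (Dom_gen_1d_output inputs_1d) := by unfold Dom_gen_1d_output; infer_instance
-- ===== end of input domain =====

-- B replaces A's running-state scan by a two-stage segment fill (collect nonzero
-- positions, then emit replicated blocks); alternative decomposition, same O(n) cost.


-- ===== PORT A =====
def gen_1d_output (inputs_1d : List Int) : List Int :=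
  (inputs_1d.foldl
    (fun (st : Int × List Int) i =>
      let state := if i ≠ 0 then i else st.1
      (state, st.2 ++ [state]))
    (0, [])).2

-- ===== PORT B =====
-- Python's `nz[j][0] if nz else n` / `nz[k+1][0] if k+1 < len(nz) else n`:
-- first position in the (remaining) nonzero list, or n
def pvHeadPos (n : Int) : List (Int × Int) → Int
  | [] => n
  | (p, _) :: _ => p

-- the loop `for k, (p, v) in enumerate(nz): end = …; out += [v] * (end - p)`
-- (peeking at nz[k+1] = head of the rest) as structural recursion over nz
def pvSegs (n : Int) : List (Int × Int) → List Int
  | [] => []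
  | (p, v) :: rest => List.replicate (pvHeadPos n rest - p).toNat v ++ pvSegs n rest

def gen_1d_output_alt (inputs_1d : List Int) : List Int :=
  let n : Int := inputs_1d.length
  let nz := (PySem.List.enumerate inputs_1d).filter (fun pv => pv.2 ≠ 0)
  List.replicate (pvHeadPos n nz).toNat 0 ++ pvSegs n nz

-- ===== PRECONDITION & SPEC =====
def Spec_gen_1d_output (inputs_1d : List Int) (out : List Int) : Prop := out = gen_1d_output_alt inputs_1d
instance (inputs_1d : List Int) (out : List Int) : Decidable (Spec_gen_1d_output inputs_1d out) := by unfold Spec_gen_1d_output; infer_instance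

-- ===== CLAIM (what is proved, stated in full; the proofs are below) =====
def Claim_equal_gen_1d_output : Prop := ∀ (inputs_1d : List Int), Dom_gen_1d_output inputs_1d → Spec_gen_1d_output inputs_1d (gen_1d_output inputs_1d)

-- ===== LEMMAS AND PROOFS =====

-- A's scan, detached from the foldl
def pvAccumFill (st : Int) : List Int → List Int
  | [] => []
  | x :: xs =>
    let v := if x ≠ 0 then x else st
    v :: pvAccumFill v xs

theorem foldl_eq_accum (l : List Int) (st : Int) (t : List Int) :
    (l.foldl
      (fun (s : Int × List Int) i =>
        let state := if i ≠ 0 then i else s.1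
        (state, s.2 ++ [state]))
      (st, t)).2 = t ++ pvAccumFill st l := by
  induction l generalizing st t with
  | nil => simp [pvAccumFill]
  | cons x xs ih =>
    rw [List.foldl_cons, ih]
    simp [pvAccumFill, List.append_assoc]

-- B-side abbreviation: nonzero entries of l with their indices
def pvNZ (l : List Int) : List (Int × Int) :=
  (PySem.List.enumerate l).filter (fun pv => pv.2 ≠ 0)

theorem enumerate_shift (l : List Int) (s : Int) :
    PySem.List.enumerate l (s + 1) =
      (PySem.List.enumerate l s).map (fun pv => (pv.1 + 1, pv.2)) := by
  induction l generalizing s with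
  | nil => simp [PySem.List.enumerate_nil]
  | cons x xs ih =>
    rw [PySem.List.enumerate_cons, PySem.List.enumerate_cons, ih (s + 1)]
    simp

theorem pvNZ_cons (x : Int) (xs : List Int) :
    pvNZ (x :: xs) =
      (if x ≠ 0 then [((0 : Int), x)] else []) ++
        (pvNZ xs).map (fun pv => (pv.1 + 1, pv.2)) := by
  unfold pvNZ
  rw [PySem.List.enumerate_cons, enumerate_shift xs 0]
  rw [List.filter_cons, List.filter_map]
  by_cases h : x = 0 <;> simp [h, Function.comp_def]

theorem pvNZ_nonneg (l : List Int) : ∀ pv ∈ pvNZ l, 0 ≤ pv.1 := by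
  intro pv hpv
  have := List.mem_of_mem_filter hpv
  rcases (PySem.List.mem_enumerate_iff _ _ _).1 this with ⟨k, hk, rfl⟩
  simp

theorem pvHeadPos_shift (n : Int) (nz : List (Int × Int)) :
    pvHeadPos (n + 1) (nz.map (fun pv => (pv.1 + 1, pv.2))) = pvHeadPos n nz + 1 := by
  cases nz with
  | nil => rfl
  | cons hd tl => obtain ⟨p, v⟩ := hd; rfl

theorem pvSegs_shift (n : Int) (nz : List (Int × Int)) :
    pvSegs (n + 1) (nz.map (fun pv => (pv.1 + 1, pv.2))) = pvSegs n nz := by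
  induction nz with
  | nil => rfl
  | cons hd tl ih =>
    obtain ⟨p, v⟩ := hd
    simp only [List.map_cons, pvSegs] at ih ⊢
    rw [ih, pvHeadPos_shift, show (pvHeadPos n tl + 1 - (p + 1) : Int) = pvHeadPos n tl - p by omega]

theorem pvHeadPos_nonneg (n : Int) (nz : List (Int × Int))
    (h0 : 0 ≤ n) (hnn : ∀ pv ∈ nz, 0 ≤ pv.1) : 0 ≤ pvHeadPos n nz := by
  cases nz with
  | nil => exact h0
  | cons hd tl =>
    obtain ⟨p, v⟩ := hd
    exact hnn (p, v) (List.mem_cons_self ..)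

-- the main invariant: A's scan from state st equals the segment fill with st as filler
theorem accum_eq_segs (l : List Int) (st : Int) :
    pvAccumFill st l =
      List.replicate (pvHeadPos (l.length : Int) (pvNZ l)).toNat st ++
        pvSegs (l.length : Int) (pvNZ l) := by
  induction l generalizing st with
  | nil => simp [pvAccumFill, pvNZ, PySem.List.enumerate_nil, pvSegs, pvHeadPos]
  | cons x xs ih =>
    have hhp : 0 ≤ pvHeadPos (xs.length : Int) (pvNZ xs) :=
      pvHeadPos_nonneg _ _ (by positivity) (pvNZ_nonneg xs)
    have hlen : (((x :: xs).length : Nat) : Int) = (xs.length : Int) + 1 := by simp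
    by_cases hx : x = 0
    · subst hx
      rw [show pvAccumFill st ((0 : Int) :: xs) = st :: pvAccumFill st xs by
            simp [pvAccumFill]]
      rw [ih st, pvNZ_cons]
      simp only [ne_eq, not_true_eq_false, ite_false, List.nil_append]
      rw [hlen, pvHeadPos_shift, pvSegs_shift,
          show (pvHeadPos (xs.length : Int) (pvNZ xs) + 1).toNat =
            (pvHeadPos (xs.length : Int) (pvNZ xs)).toNat + 1 by omega,
          List.replicate_succ]
      rfl
    · rw [show pvAccumFill st (x :: xs) = x :: pvAccumFill x xs by
            simp [pvAccumFill, hx]]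
      rw [ih x, pvNZ_cons]
      simp only [hx, ne_eq, not_false_eq_true, ite_true, List.singleton_append]
      rw [hlen, show pvHeadPos ((xs.length : Int) + 1)
            (((0 : Int), x) :: (pvNZ xs).map (fun pv => (pv.1 + 1, pv.2))) = 0 from rfl]
      simp only [Int.toNat_zero, List.replicate_zero, List.nil_append, pvSegs]
      rw [pvHeadPos_shift, pvSegs_shift,
          show (pvHeadPos (xs.length : Int) (pvNZ xs) + 1 - 0 : Int) =
            pvHeadPos (xs.length : Int) (pvNZ xs) + 1 by omega,
          show (pvHeadPos (xs.length : Int) (pvNZ xs) + 1).toNat =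
            (pvHeadPos (xs.length : Int) (pvNZ xs)).toNat + 1 by omega,
          List.replicate_succ]
      rfl

-- ===== VERDICT (by name: the statement is the Claim_ definition above) =====
theorem gen_1d_output_spec : Claim_equal_gen_1d_output := by
  intro l _
  unfold Spec_gen_1d_output gen_1d_output gen_1d_output_alt
  rw [foldl_eq_accum, List.nil_append, accum_eq_segs]
  rfl
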